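-- pv_equiv track=rewrite | github.com/Sanyukta26/G87.2026.T05.GE1 | UC3M_Consulting/EnterpriseManager.py | ValidateCIF
-- ===== SOURCE A (Python) =====
-- def ValidateCIF(CiF):
--     CiF = CiF.upper()
--     if len(CiF) != 9:
--         return False
--
--     letter = CiF[0]
--     number_block = CiF[1:8].rjust(7, '0')
--     control_char = CiF[8]
--
--     def sum_digits(n):
--         return sum(int(d) for d in str(n))
--
--     # Sum even positions (2nd, 4th, 6th)
--     even_sum = sum(int(number_block[i]) for i in [1,3,5])
--     # Sum odd positions (1st, 3rd, 5th, 7th) after doubling and summing digits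
--     odd_sum = sum(sum_digits(int(number_block[i]) * 2) for i in [0,2,4,6])
--     total_sum = even_sum + odd_sum
--
--     unit = total_sum % 10
--     base_digit = 0 if unit == 0 else 10 - unit
--
--     # Determine expected control character
--     if letter in ['A','B','E','H']:
--         expected_control = str(base_digit)
--     elif letter in ['K','P','Q','S']:
--         mapping = {0:'J',1:'A',2:'B',3:'C',4:'D',5:'E',6:'F',7:'G',8:'H',9:'I'}
--         expected_control = mapping[base_digit]
--     else:
--         expected_control = str(base_digit)
--
--     return control_char == expected_control
-- ===== SOURCE B (Python) =====
-- def ValidateCIF(CiF):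
--     CiF = CiF.upper()
--     if len(CiF) != 9:
--         return False
--
--     # Luhn total computed by structural recursion from the right (rightmost digit doubled).
--     def luhn(ds, double):
--         if not ds:
--             return 0
--         d = int(ds[-1])
--         if double:
--             d = 2 * d - (9 if d > 4 else 0)
--         return d + luhn(ds[:-1], not double)
--
--     total = luhn(CiF[1:8], True)
--
--     # Instead of constructing the expected control character, read the actual control
--     # character back as a number (letter index for K/P/Q/S companies, digit value
--     # otherwise; -1 if it is of the wrong kind) and verify the checksum congruence.
--     control = CiF[8]
--     if CiF[0] in 'KPQS':
--         v = 'JABCDEFGHI'.find(control)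
--     else:
--         v = int(control) if control.isdigit() else -1
--     return v >= 0 and (total + v) % 10 == 0
-- ===== Notes on version B (the rewrite author's own statement) =====
-- stated objective: alternative
-- what changed: B computes the Luhn total by structural recursion from the right with an alternating doubling flag (using 2d-9 for d>4 instead of a digit-sum helper), and instead of constructing the expected control character it decodes the actual control character to its numeric value ('JABCDEFGHI'.find for K/P/Q/S, digit value otherwise) and checks the checksum congruence (total+v)%10==0 directly.
import Mathlib
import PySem

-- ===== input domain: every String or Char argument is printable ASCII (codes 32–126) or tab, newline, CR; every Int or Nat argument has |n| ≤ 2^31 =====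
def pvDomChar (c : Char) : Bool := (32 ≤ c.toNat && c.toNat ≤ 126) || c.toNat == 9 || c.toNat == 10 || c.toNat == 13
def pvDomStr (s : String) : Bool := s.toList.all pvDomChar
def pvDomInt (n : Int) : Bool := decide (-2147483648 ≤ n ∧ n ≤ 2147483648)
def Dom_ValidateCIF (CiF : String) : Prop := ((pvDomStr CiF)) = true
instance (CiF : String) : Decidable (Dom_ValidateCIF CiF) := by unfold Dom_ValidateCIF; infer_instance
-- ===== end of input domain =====

-- B computes the Luhn total by structural recursion from the right and, instead of constructing
-- the expected control character, decodes the actual control character to a number and checks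
-- the checksum congruence (total+v) % 10 == 0 directly (alternative decomposition).

-- ===== PORT A =====
-- A's inner helper sum_digits(n) = sum(int(d) for d in str(n)); here n ≥ 0 so int() never raises
def pvSumDigits (n : Int) : Int :=
  (PySem.Int.toChars n).foldl (fun acc d => acc + (PySem.Int.ofChars? [d]).getD 0) 0

-- int(cs[i]); the .getD 0 defaults are where Python raises, excluded by Pre_
def pvIntAt (cs : List Char) (i : Int) : Int :=
  ((PySem.List.pyGet? cs i).bind (fun c => PySem.Int.ofChars? [c])).getD 0

-- s.rjust(w, c): pad on the left to width w (exact for this use: fill char '0', no truncation)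
def pvRjust (cs : List Char) (w : Nat) (c : Char) : List Char :=
  List.replicate (w - cs.length) c ++ cs

def ValidateCIF (CiF : String) : Bool :=
  let C := PySem.Chars.upper CiF.toList
  if C.length ≠ 9 then false else
    let letter := (PySem.List.pyGet? C 0).getD ' '
    let number_block := pvRjust (PySem.List.slice C (some 1) (some 8)) 7 '0'
    let control_char := (PySem.List.pyGet? C 8).getD ' '
    let even_sum := ([1, 3, 5] : List Int).foldl (fun a i => a + pvIntAt number_block i) 0
    let odd_sum :=
      ([0, 2, 4, 6] : List Int).foldl (fun a i => a + pvSumDigits (pvIntAt number_block i * 2)) 0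
    let total_sum := even_sum + odd_sum
    let unit := PySem.Int.mod total_sum 10
    let base_digit : Int := if unit = 0 then 0 else 10 - unit
    let expected_control : List Char :=
      if letter ∈ ['A', 'B', 'E', 'H'] then PySem.Int.toChars base_digit
      else if letter ∈ ['K', 'P', 'Q', 'S'] then
        ((PySem.Dict.mk [((0 : Int), ['J']), (1, ['A']), (2, ['B']), (3, ['C']), (4, ['D']),
            (5, ['E']), (6, ['F']), (7, ['G']), (8, ['H']), (9, ['I'])]).get? base_digit).getD []
      else PySem.Int.toChars base_digit
    decide ([control_char] = expected_control)

-- ===== PORT B =====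
-- B's recursive helper luhn(ds, double): ds[-1] via pyGet?, ds[:-1] = dropLast (exact: Python's
-- ds[:-1] is all but the last element, [] on the empty string); int() failure (.getD 0) excluded by Pre_
def pvLuhn (ds : List Char) (double : Bool) : Int :=
  if ds.isEmpty then 0
  else
    let d0 := ((PySem.List.pyGet? ds (-1)).bind (fun c => PySem.Int.ofChars? [c])).getD 0
    let d := if double then 2 * d0 - (if d0 > 4 then 9 else 0) else d0
    d + pvLuhn ds.dropLast (!double)
termination_by ds.length
decreasing_by
  rename_i h
  have hne : ds ≠ [] := by simpa using h
  have := List.length_pos_of_ne_nil hne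
  simp only [List.length_dropLast]
  omega

def ValidateCIF_alt (CiF : String) : Bool :=
  let C := PySem.Chars.upper CiF.toList
  if C.length ≠ 9 then false else
    let total := pvLuhn (PySem.List.slice C (some 1) (some 8)) true
    let control := (PySem.List.pyGet? C 8).getD ' '
    let v : Int :=
      if PySem.Chars.isIn [(PySem.List.pyGet? C 0).getD ' '] "KPQS".toList then
        PySem.Chars.find "JABCDEFGHI".toList [control]
      else if PySem.Chars.isdigit control then (PySem.Int.ofChars? [control]).getD 0 else -1
    decide (v ≥ 0 ∧ PySem.Int.mod (total + v) 10 = 0)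

-- ===== PRECONDITION & SPEC =====
-- Pre_ excludes exactly the inputs where Python's int() raises ValueError in A (a 9-char string
-- whose positions 1..7 are not all digits); B raises there too, so no input A returns on is excluded.
def Pre_ValidateCIF (CiF : String) : Prop :=
  CiF.toList.length = 9 → ((CiF.toList.drop 1).take 7).all PySem.Chars.isdigit = true
instance (CiF : String) : Decidable (Pre_ValidateCIF CiF) := by unfold Pre_ValidateCIF; infer_instance

def pvWitness_ValidateCIF : String := "A58818501"

def Spec_ValidateCIF (CiF : String) (out : Bool) : Prop := out = ValidateCIF_alt CiF
instance (CiF : String) (out : Bool) : Decidable (Spec_ValidateCIF CiF out) := by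
  unfold Spec_ValidateCIF; infer_instance

-- ===== CLAIM (what is proved, stated in full; the proofs are below) =====
def Claim_equal_ValidateCIF : Prop :=
  ∀ (CiF : String), Dom_ValidateCIF CiF → Pre_ValidateCIF CiF →
    Spec_ValidateCIF CiF (ValidateCIF CiF)

-- ===== LEMMAS AND PROOFS =====

lemma digit_cases (c : Char) (h : PySem.Chars.isdigit c = true) :
    c = '0' ∨ c = '1' ∨ c = '2' ∨ c = '3' ∨ c = '4' ∨
    c = '5' ∨ c = '6' ∨ c = '7' ∨ c = '8' ∨ c = '9' := by
  have hb : 48 ≤ c.toNat ∧ c.toNat ≤ 57 := by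
    simpa [PySem.Chars.isdigit, Char.le_def, UInt32.le_iff_toNat_le] using h
  have hc := Char.ofNat_toNat c
  have : c.toNat = 48 ∨ c.toNat = 49 ∨ c.toNat = 50 ∨ c.toNat = 51 ∨ c.toNat = 52 ∨
      c.toNat = 53 ∨ c.toNat = 54 ∨ c.toNat = 55 ∨ c.toNat = 56 ∨ c.toNat = 57 := by omega
  rcases this with h'|h'|h'|h'|h'|h'|h'|h'|h'|h' <;> rw [h'] at hc <;>
    simp_all <;> first
      | exact Or.inl hc.symm
      | (rw [← hc]; decide)

lemma upperChar_digit (c : Char) (h : PySem.Chars.isdigit c = true) :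
    PySem.Chars.upperChar c = c := by
  rcases digit_cases c h with rfl|rfl|rfl|rfl|rfl|rfl|rfl|rfl|rfl|rfl <;> decide

-- digit-sum of the doubled digit (A's term) equals B's 2d - (9 if d > 4 else 0)
lemma double_term_eq (c : Char) (h : PySem.Chars.isdigit c = true) :
    pvSumDigits ((PySem.Int.ofChars? [c]).getD 0 * 2)
      = 2 * ((PySem.Int.ofChars? [c]).getD 0)
        - (if ((PySem.Int.ofChars? [c]).getD 0) > 4 then 9 else 0) := by
  rcases digit_cases c h with rfl|rfl|rfl|rfl|rfl|rfl|rfl|rfl|rfl|rfl <;> decide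

lemma slice18 (a b1 b2 b3 b4 b5 b6 b7 h8 : Char) :
    PySem.List.slice [a, b1, b2, b3, b4, b5, b6, b7, h8] (some 1) (some 8)
      = [b1, b2, b3, b4, b5, b6, b7] := by
  rw [show ((1 : Int)) = ((1 : Nat) : Int) by norm_num,
    show ((8 : Int)) = ((8 : Nat) : Int) by norm_num, PySem.List.slice_natCast]
  rfl

lemma rjust7 (x1 x2 x3 x4 x5 x6 x7 : Char) :
    pvRjust [x1, x2, x3, x4, x5, x6, x7] 7 '0' = [x1, x2, x3, x4, x5, x6, x7] := rfl

lemma nine_elems (l : List Char) (hl : l.length = 9) :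
    ∃ a b c d e f g h i, l = [a, b, c, d, e, f, g, h, i] := by
  match l, hl with
  | [a, b, c, d, e, f, g, h, i], _ => exact ⟨a, b, c, d, e, f, g, h, i, rfl⟩

lemma mod10_eq (a : Int) : PySem.Int.mod a 10 = a % 10 := by
  simp [PySem.Int.mod, Int.fmod_eq_emod]

-- for 0 ≤ k < 10, the checksum congruence picks out exactly A's base digit
lemma cong_iff (t k : Int) (hk0 : 0 ≤ k) (hk1 : k < 10) :
    (k ≥ 0 ∧ PySem.Int.mod (t + k) 10 = 0)
      ↔ k = (if PySem.Int.mod t 10 = 0 then (0 : Int) else 10 - PySem.Int.mod t 10) := by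
  rw [mod10_eq, mod10_eq]
  split_ifs with h <;> omega

lemma base_bounds (t : Int) :
    0 ≤ (if PySem.Int.mod t 10 = 0 then (0 : Int) else 10 - PySem.Int.mod t 10)
      ∧ (if PySem.Int.mod t 10 = 0 then (0 : Int) else 10 - PySem.Int.mod t 10) < 10 := by
  rw [mod10_eq]
  split_ifs with h <;> omega

-- A's mapping-dict lookup matches [cc] exactly when B's find of cc returns b
lemma lookup_eq_iff (cc : Char) (hin : cc ∈ "JABCDEFGHI".toList) (b : Int)
    (hb0 : 0 ≤ b) (hb1 : b < 10) :
    (([cc] : List Char)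
        = ((PySem.Dict.mk [((0 : Int), ['J']), (1, ['A']), (2, ['B']), (3, ['C']), (4, ['D']),
            (5, ['E']), (6, ['F']), (7, ['G']), (8, ['H']), (9, ['I'])]).get? b).getD [])
      ↔ PySem.Chars.find "JABCDEFGHI".toList [cc] = b := by
  have hb : b = 0 ∨ b = 1 ∨ b = 2 ∨ b = 3 ∨ b = 4 ∨ b = 5 ∨ b = 6 ∨ b = 7 ∨ b = 8 ∨ b = 9 := by
    omega
  simp only [show "JABCDEFGHI".toList = ['J','A','B','C','D','E','F','G','H','I'] from rfl,
    List.mem_cons, List.not_mem_nil, or_false] at hin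
  rcases hin with rfl|rfl|rfl|rfl|rfl|rfl|rfl|rfl|rfl|rfl <;>
    rcases hb with rfl|rfl|rfl|rfl|rfl|rfl|rfl|rfl|rfl|rfl <;> decide

-- A's str(base) matches [cc] (cc a digit) exactly when cc's digit value is b
lemma tochars_eq_iff (cc : Char) (hd : PySem.Chars.isdigit cc = true) (b : Int)
    (hb0 : 0 ≤ b) (hb1 : b < 10) :
    (([cc] : List Char) = PySem.Int.toChars b) ↔ (PySem.Int.ofChars? [cc]).getD 0 = b := by
  have hb : b = 0 ∨ b = 1 ∨ b = 2 ∨ b = 3 ∨ b = 4 ∨ b = 5 ∨ b = 6 ∨ b = 7 ∨ b = 8 ∨ b = 9 := by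
    omega
  rcases digit_cases cc hd with rfl|rfl|rfl|rfl|rfl|rfl|rfl|rfl|rfl|rfl <;>
    rcases hb with rfl|rfl|rfl|rfl|rfl|rfl|rfl|rfl|rfl|rfl <;> decide

lemma pv_int10 (b : Int) (hb0 : 0 ≤ b) (hb1 : b < 10) :
    b = 0 ∨ b = 1 ∨ b = 2 ∨ b = 3 ∨ b = 4 ∨ b = 5 ∨ b = 6 ∨ b = 7 ∨ b = 8 ∨ b = 9 := by
  omega

-- the comparison tails of the two ports agree for any letter, control char and total
lemma tail_eq (lt cc : Char) (t : Int) :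
    (decide ([cc] = (if lt ∈ ['A', 'B', 'E', 'H'] then
        PySem.Int.toChars (if PySem.Int.mod t 10 = 0 then (0 : Int) else 10 - PySem.Int.mod t 10)
      else if lt ∈ ['K', 'P', 'Q', 'S'] then
        ((PySem.Dict.mk [((0 : Int), ['J']), (1, ['A']), (2, ['B']), (3, ['C']), (4, ['D']),
            (5, ['E']), (6, ['F']), (7, ['G']), (8, ['H']),
            (9, ['I'])]).get? (if PySem.Int.mod t 10 = 0 then (0 : Int)
              else 10 - PySem.Int.mod t 10)).getD []
      else PySem.Int.toChars (if PySem.Int.mod t 10 = 0 then (0 : Int)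
        else 10 - PySem.Int.mod t 10))))
    = (decide ((if PySem.Chars.isIn [lt] "KPQS".toList then
          PySem.Chars.find "JABCDEFGHI".toList [cc]
        else if PySem.Chars.isdigit cc then (PySem.Int.ofChars? [cc]).getD 0 else -1) ≥ 0
      ∧ PySem.Int.mod (t + (if PySem.Chars.isIn [lt] "KPQS".toList then
          PySem.Chars.find "JABCDEFGHI".toList [cc]
        else if PySem.Chars.isdigit cc then (PySem.Int.ofChars? [cc]).getD 0 else -1)) 10 = 0)) := by
  have hb := base_bounds t
  rw [decide_eq_decide]
  by_cases hK : lt ∈ ['K', 'P', 'Q', 'S']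
  · have hlt : lt = 'K' ∨ lt = 'P' ∨ lt = 'Q' ∨ lt = 'S' := by simpa using hK
    have hisIn : PySem.Chars.isIn [lt] "KPQS".toList = true := by
      rw [PySem.Chars.isIn_iff_infix, List.singleton_infix_iff]
      rcases hlt with rfl|rfl|rfl|rfl <;> decide
    have hA : lt ∉ ['A', 'B', 'E', 'H'] := by
      rcases hlt with rfl|rfl|rfl|rfl <;> decide
    rw [if_neg hA, if_pos hK, if_pos hisIn]
    by_cases hin : cc ∈ "JABCDEFGHI".toList
    · rw [lookup_eq_iff cc hin _ hb.1 hb.2]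
      have h0 : 0 ≤ PySem.Chars.find "JABCDEFGHI".toList [cc] := by
        rw [PySem.Chars.find_nonneg_iff, List.singleton_infix_iff]
        exact hin
      have h1 : PySem.Chars.find "JABCDEFGHI".toList [cc] < 10 := by
        have hle := PySem.Chars.find_le_length "JABCDEFGHI".toList [cc]
        by_contra hge
        have h10 : PySem.Chars.find "JABCDEFGHI".toList [cc] = 10 := by
          simp only [show ("JABCDEFGHI".toList : List Char).length = 10 from by decide] at hle
          omega
        have hsp := (PySem.Chars.find_spec (s := "JABCDEFGHI".toList) (sub := [cc]) h0).1
        rw [h10] at hsp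
        simp at hsp
      exact (cong_iff t _ h0 h1).symm
    · have hf : PySem.Chars.find "JABCDEFGHI".toList [cc] = -1 := by
        rw [PySem.Chars.find_eq_neg_one_iff, List.singleton_infix_iff]
        exact hin
      rw [hf]
      constructor
      · intro hc
        exfalso
        revert hc
        rcases pv_int10 _ hb.1 hb.2 with h'|h'|h'|h'|h'|h'|h'|h'|h'|h' <;> rw [h'] <;> intro hc <;>
          · apply hin
            have : cc = _ := List.head_eq_of_cons_eq hc
            rw [this]; decide
      · rintro ⟨hge, -⟩; omega
  · have hisIn : PySem.Chars.isIn [lt] "KPQS".toList = false := by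
      rw [Bool.eq_false_iff]
      intro hc
      rw [PySem.Chars.isIn_iff_infix, List.singleton_infix_iff] at hc
      simp only [show "KPQS".toList = ['K', 'P', 'Q', 'S'] from rfl] at hc
      exact hK hc
    rw [if_neg hK]
    simp only [hisIn, Bool.false_eq_true, if_false, ite_self]
    by_cases hd : PySem.Chars.isdigit cc
    · rw [if_pos hd, tochars_eq_iff cc hd _ hb.1 hb.2]
      have hv : 0 ≤ (PySem.Int.ofChars? [cc]).getD 0 ∧ (PySem.Int.ofChars? [cc]).getD 0 < 10 := by
        rcases digit_cases cc hd with rfl|rfl|rfl|rfl|rfl|rfl|rfl|rfl|rfl|rfl <;> decide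
      exact (cong_iff t _ hv.1 hv.2).symm
    · rw [if_neg hd]
      constructor
      · intro hc
        exfalso
        revert hc
        rcases pv_int10 _ hb.1 hb.2 with h'|h'|h'|h'|h'|h'|h'|h'|h'|h' <;> rw [h'] <;> intro hc <;>
          · apply absurd hd
            have : cc = _ := List.head_eq_of_cons_eq hc
            rw [this]; decide
      · rintro ⟨hge, -⟩; omega

-- ===== VERDICT (by name: the statement is the Claim_ definition above) =====
theorem ValidateCIF_spec : Claim_equal_ValidateCIF := by
  intro CiF _ hpre
  unfold Spec_ValidateCIF ValidateCIF ValidateCIF_alt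
  unfold Pre_ValidateCIF at hpre
  by_cases h9 : CiF.toList.length = 9
  case neg =>
    have h9' : (PySem.Chars.upper CiF.toList).length ≠ 9 := by
      simpa [PySem.Chars.upper] using h9
    rw [if_pos h9', if_pos h9']
  case pos =>
    obtain ⟨a, b1, b2, b3, b4, b5, b6, b7, h8, hL⟩ := nine_elems _ h9
    have hd := hpre h9
    rw [hL] at hd ⊢
    simp only [List.drop, List.take, List.all_cons, List.all_nil, Bool.and_true,
      Bool.and_eq_true] at hd
    obtain ⟨hd1, hd2, hd3, hd4, hd5, hd6, hd7⟩ := hd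
    simp only [PySem.Chars.upper, List.map]
    rw [upperChar_digit b1 hd1, upperChar_digit b2 hd2, upperChar_digit b3 hd3,
        upperChar_digit b4 hd4, upperChar_digit b5 hd5, upperChar_digit b6 hd6,
        upperChar_digit b7 hd7]
    have hg : ¬ (List.length [PySem.Chars.upperChar a, b1, b2, b3, b4, b5, b6, b7,
        PySem.Chars.upperChar h8] ≠ 9) := by simp
    simp only [if_neg hg]
    rw [slice18, rjust7]
    have e0 : pvIntAt [b1, b2, b3, b4, b5, b6, b7] 0 = (PySem.Int.ofChars? [b1]).getD 0 := by
      simp [pvIntAt, PySem.List.pyGet?, PySem.List.pyIdx?]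
    have e1 : pvIntAt [b1, b2, b3, b4, b5, b6, b7] 1 = (PySem.Int.ofChars? [b2]).getD 0 := by
      simp [pvIntAt, PySem.List.pyGet?, PySem.List.pyIdx?]
    have e2 : pvIntAt [b1, b2, b3, b4, b5, b6, b7] 2 = (PySem.Int.ofChars? [b3]).getD 0 := by
      simp [pvIntAt, PySem.List.pyGet?, PySem.List.pyIdx?]
    have e3 : pvIntAt [b1, b2, b3, b4, b5, b6, b7] 3 = (PySem.Int.ofChars? [b4]).getD 0 := by
      simp [pvIntAt, PySem.List.pyGet?, PySem.List.pyIdx?]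
    have e4 : pvIntAt [b1, b2, b3, b4, b5, b6, b7] 4 = (PySem.Int.ofChars? [b5]).getD 0 := by
      simp [pvIntAt, PySem.List.pyGet?, PySem.List.pyIdx?]
    have e5 : pvIntAt [b1, b2, b3, b4, b5, b6, b7] 5 = (PySem.Int.ofChars? [b6]).getD 0 := by
      simp [pvIntAt, PySem.List.pyGet?, PySem.List.pyIdx?]
    have e6 : pvIntAt [b1, b2, b3, b4, b5, b6, b7] 6 = (PySem.Int.ofChars? [b7]).getD 0 := by
      simp [pvIntAt, PySem.List.pyGet?, PySem.List.pyIdx?]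
    simp only [List.foldl, e0, e1, e2, e3, e4, e5, e6]
    rw [double_term_eq b1 hd1, double_term_eq b3 hd3, double_term_eq b5 hd5,
        double_term_eq b7 hd7]
    have hluhn : pvLuhn [b1, b2, b3, b4, b5, b6, b7] true
        = ((0 + (2 * ((PySem.Int.ofChars? [b1]).getD 0)
              - (if ((PySem.Int.ofChars? [b1]).getD 0) > 4 then 9 else 0))
            + (PySem.Int.ofChars? [b2]).getD 0)
          + (2 * ((PySem.Int.ofChars? [b3]).getD 0)
              - (if ((PySem.Int.ofChars? [b3]).getD 0) > 4 then 9 else 0))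
          + (PySem.Int.ofChars? [b4]).getD 0)
          + (2 * ((PySem.Int.ofChars? [b5]).getD 0)
              - (if ((PySem.Int.ofChars? [b5]).getD 0) > 4 then 9 else 0))
          + (PySem.Int.ofChars? [b6]).getD 0
          + (2 * ((PySem.Int.ofChars? [b7]).getD 0)
              - (if ((PySem.Int.ofChars? [b7]).getD 0) > 4 then 9 else 0)) := by
      rw [pvLuhn, pvLuhn, pvLuhn, pvLuhn, pvLuhn, pvLuhn, pvLuhn, pvLuhn]
      simp [PySem.List.pyGet?, PySem.List.pyIdx?]
      ring
    rw [hluhn]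
    have g0 : (PySem.List.pyGet? [PySem.Chars.upperChar a, b1, b2, b3, b4, b5, b6, b7,
        PySem.Chars.upperChar h8] 0).getD ' ' = PySem.Chars.upperChar a := by
      simp [PySem.List.pyGet?, PySem.List.pyIdx?]
    have g8 : (PySem.List.pyGet? [PySem.Chars.upperChar a, b1, b2, b3, b4, b5, b6, b7,
        PySem.Chars.upperChar h8] 8).getD ' ' = PySem.Chars.upperChar h8 := by
      simp [PySem.List.pyGet?, PySem.List.pyIdx?]
    rw [g0, g8]
    rw [show ((0 : Int) + (PySem.Int.ofChars? [b2]).getD 0 + (PySem.Int.ofChars? [b4]).getD 0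
          + (PySem.Int.ofChars? [b6]).getD 0)
        + (0 + (2 * ((PySem.Int.ofChars? [b1]).getD 0)
              - (if ((PySem.Int.ofChars? [b1]).getD 0) > 4 then 9 else 0))
          + (2 * ((PySem.Int.ofChars? [b3]).getD 0)
              - (if ((PySem.Int.ofChars? [b3]).getD 0) > 4 then 9 else 0))
          + (2 * ((PySem.Int.ofChars? [b5]).getD 0)
              - (if ((PySem.Int.ofChars? [b5]).getD 0) > 4 then 9 else 0))
          + (2 * ((PySem.Int.ofChars? [b7]).getD 0)
              - (if ((PySem.Int.ofChars? [b7]).getD 0) > 4 then 9 else 0)))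
        = ((0 + (2 * ((PySem.Int.ofChars? [b1]).getD 0)
              - (if ((PySem.Int.ofChars? [b1]).getD 0) > 4 then 9 else 0))
            + (PySem.Int.ofChars? [b2]).getD 0)
          + (2 * ((PySem.Int.ofChars? [b3]).getD 0)
              - (if ((PySem.Int.ofChars? [b3]).getD 0) > 4 then 9 else 0))
          + (PySem.Int.ofChars? [b4]).getD 0)
          + (2 * ((PySem.Int.ofChars? [b5]).getD 0)
              - (if ((PySem.Int.ofChars? [b5]).getD 0) > 4 then 9 else 0))
          + (PySem.Int.ofChars? [b6]).getD 0
          + (2 * ((PySem.Int.ofChars? [b7]).getD 0)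
              - (if ((PySem.Int.ofChars? [b7]).getD 0) > 4 then 9 else 0)) from by ring]
    exact tail_eq _ _ _
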